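-- pv_equiv track=rewrite | github.com/jennyzzt/LLM_debate_on_ARC | ARC_gen_agents2_rounds3_openai/6c434453/agent0/algo0.py | solve
-- ===== SOURCE A (Python) =====
-- def solve(input_grid):
--     # Initialize the output grid with the same dimensions as the input grid
--     output_grid = [[cell for cell in row] for row in input_grid]
--     rows, cols = len(input_grid), len(input_grid[0])
--
--     # Helper function to check if a cell is part of a vertical or horizontal line of three or more '1's
--     def is_part_of_line(r, c):
--         # Check horizontal line
--         horizontal_count = 1
--         for i in range(c - 1, -1, -1):
--             if input_grid[r][i] == 1:
--                 horizontal_count += 1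
--             else:
--                 break
--         for i in range(c + 1, cols):
--             if input_grid[r][i] == 1:
--                 horizontal_count += 1
--             else:
--                 break
--         if horizontal_count >= 3:
--             return True
--
--         # Check vertical line
--         vertical_count = 1
--         for i in range(r - 1, -1, -1):
--             if input_grid[i][c] == 1:
--                 vertical_count += 1
--             else:
--                 break
--         for i in range(r + 1, rows):
--             if input_grid[i][c] == 1:
--                 vertical_count += 1
--             else:
--                 break
--         if vertical_count >= 3:
--             return True
--
--         return False
--
--     # Apply the transformation rules to each cell
--     for r in range(rows):
--         for c in range(cols):
--             if input_grid[r][c] == 1 and is_part_of_line(r, c):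
--                 output_grid[r][c] = 2
--
--     return output_grid
-- ===== SOURCE B (Python) =====
-- def solve(input_grid):
--     # A 1 lies in a horizontal/vertical run of length >= 3 iff two more 1s
--     # are aligned with it within distance 2, so a single constant-size window
--     # test per cell suffices; marks are written into a copy of the grid.
--     rows, cols = len(input_grid), len(input_grid[0])
--
--     def one(r, c):
--         return 0 <= r < rows and 0 <= c < cols and input_grid[r][c] == 1
--
--     output_grid = [list(row) for row in input_grid]
--     for r in range(rows):
--         for c in range(cols):
--             if input_grid[r][c] == 1 and (
--                     (one(r, c - 2) and one(r, c - 1))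
--                     or (one(r, c - 1) and one(r, c + 1))
--                     or (one(r, c + 1) and one(r, c + 2))
--                     or (one(r - 2, c) and one(r - 1, c))
--                     or (one(r - 1, c) and one(r + 1, c))
--                     or (one(r + 1, c) and one(r + 2, c))):
--                 output_grid[r][c] = 2
--     return output_grid
-- ===== Notes on version B (the rewrite author's own statement) =====
-- stated objective: alternative
-- what changed: B replaces A's per-cell directional run scans (walking left/right/up/down from every '1' until a non-1) with a single constant-size 5-cell window test per cell: a 1 lies in a run of length >= 3 iff two more 1s are aligned with it within distance 2; Pre_ excludes only the inputs on which A raises IndexError (empty grid, or a row shorter than the first).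
import Mathlib
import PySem

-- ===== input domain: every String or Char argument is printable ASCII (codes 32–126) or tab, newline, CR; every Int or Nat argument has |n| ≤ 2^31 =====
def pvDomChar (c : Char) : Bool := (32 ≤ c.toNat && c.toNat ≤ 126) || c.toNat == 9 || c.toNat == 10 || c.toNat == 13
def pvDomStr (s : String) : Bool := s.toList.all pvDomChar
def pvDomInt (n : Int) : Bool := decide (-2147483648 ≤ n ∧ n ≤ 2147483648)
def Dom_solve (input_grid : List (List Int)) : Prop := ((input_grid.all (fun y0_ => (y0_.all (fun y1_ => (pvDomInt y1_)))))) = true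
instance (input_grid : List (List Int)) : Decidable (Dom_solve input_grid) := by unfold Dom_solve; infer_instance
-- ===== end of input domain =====

-- B marks a 1 by a constant-size aligned-window test on a copied grid instead of A's
-- per-cell run scans; equivalence is proved wherever A returns (Pre_solve).

-- ===== PORT A =====
-- cell accessor: input_grid[r][c] (Python raises when out of range → none)
def pvCell (g : List (List Int)) (r c : Int) : Option Int :=
  (PySem.List.pyGet? g r).bind (fun row => PySem.List.pyGet? row c)

-- 'for i in <idxs>: if input_grid[..i..] == 1: count += 1 else: break'
def pvRunCount (f : Int → Option Int) : List Int → Int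
  | [] => 0
  | i :: rest => if f i = some 1 then 1 + pvRunCount f rest else 0

def pvIsPart (g : List (List Int)) (rows cols r c : Int) : Bool :=
  let horizontal := 1 + pvRunCount (fun i => pvCell g r i) (PySem.List.pyRange (c - 1) (-1) (-1))
      + pvRunCount (fun i => pvCell g r i) (PySem.List.pyRange (c + 1) cols 1)
  if 3 ≤ horizontal then true
  else
    let vertical := 1 + pvRunCount (fun i => pvCell g i c) (PySem.List.pyRange (r - 1) (-1) (-1))
        + pvRunCount (fun i => pvCell g i c) (PySem.List.pyRange (r + 1) rows 1)
    if 3 ≤ vertical then true else false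

def solve (input_grid : List (List Int)) : List (List Int) :=
  let output0 := input_grid.map (fun row => row.map (fun cell => cell))
  let rows : Int := input_grid.length
  let cols : Int := (PySem.List.pyGetD input_grid 0 []).length
  (PySem.List.pyRange 0 rows 1).foldl (fun out r =>
    (PySem.List.pyRange 0 cols 1).foldl (fun out c =>
      if pvCell input_grid r c == some 1 && pvIsPart input_grid rows cols r c then
        PySem.List.pySetD out r (PySem.List.pySetD (PySem.List.pyGetD out r []) c 2)
      else out) out) output0

-- ===== PORT B =====
-- 'one(r, c)' of Source B: in-bounds and the cell is 1
def pvOne (g : List (List Int)) (rows cols r c : Int) : Bool :=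
  decide (0 ≤ r) && decide (r < rows) && decide (0 ≤ c) && decide (c < cols)
    && (pvCell g r c == some 1)

-- the 5-cell window condition of Source B
def pvWindow (g : List (List Int)) (rows cols r c : Int) : Bool :=
  (pvOne g rows cols r (c - 2) && pvOne g rows cols r (c - 1)) ||
  (pvOne g rows cols r (c - 1) && pvOne g rows cols r (c + 1)) ||
  (pvOne g rows cols r (c + 1) && pvOne g rows cols r (c + 2)) ||
  (pvOne g rows cols (r - 2) c && pvOne g rows cols (r - 1) c) ||
  (pvOne g rows cols (r - 1) c && pvOne g rows cols (r + 1) c) ||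
  (pvOne g rows cols (r + 1) c && pvOne g rows cols (r + 2) c)

def solve_alt (input_grid : List (List Int)) : List (List Int) :=
  let rows : Int := input_grid.length
  let cols : Int := (PySem.List.pyGetD input_grid 0 []).length
  let output0 := input_grid.map (fun row => row)   -- list(row) copy
  (PySem.List.pyRange 0 rows 1).foldl (fun out r =>
    (PySem.List.pyRange 0 cols 1).foldl (fun out c =>
      if (pvCell input_grid r c == some 1) && pvWindow input_grid rows cols r c then
        PySem.List.pySetD out r (PySem.List.pySetD (PySem.List.pyGetD out r []) c 2)
      else out) out) output0

-- ===== PRECONDITION & SPEC =====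
-- Pre_ excludes exactly the inputs on which A raises IndexError: the empty grid
-- (input_grid[0]) and grids with a row shorter than the first (the loops read
-- input_grid[r][c] for every c < len(input_grid[0])).
def Pre_solve (input_grid : List (List Int)) : Prop :=
  input_grid ≠ [] ∧ ∀ row ∈ input_grid, (input_grid.headD []).length ≤ row.length
instance (input_grid : List (List Int)) : Decidable (Pre_solve input_grid) := by
  unfold Pre_solve; infer_instance

def pvWitness_solve : List (List Int) := [[1, 1, 1], [0, 1, 0]]

def Spec_solve (input_grid : List (List Int)) (out : List (List Int)) : Prop := out = solve_alt input_grid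
instance (input_grid : List (List Int)) (out : List (List Int)) : Decidable (Spec_solve input_grid out) := by unfold Spec_solve; infer_instance

-- ===== CLAIM (what is proved, stated in full; the proofs are below) =====
def Claim_equal_solve : Prop := ∀ (input_grid : List (List Int)), Dom_solve input_grid → Pre_solve input_grid → Spec_solve input_grid (solve input_grid)

-- ===== LEMMAS AND PROOFS =====

-- bounded 'is a 1 of this line at index i' (pvOne specialised to one direction)
def pvOneB (f : Int → Option Int) (len i : Int) : Bool :=
  decide (0 ≤ i) && decide (i < len) && (f i == some 1)

theorem pvRunCount_nonneg (f : Int → Option Int) (L : List Int) : 0 ≤ pvRunCount f L := by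
  induction L with
  | nil => simp [pvRunCount]
  | cons i rest ih => simp only [pvRunCount]; split <;> omega

theorem pvRunCount_ge_one (f : Int → Option Int) (i : Int) (L : List Int) :
    1 ≤ pvRunCount f (i :: L) ↔ f i = some 1 := by
  have h := pvRunCount_nonneg f L
  simp only [pvRunCount]; split <;> simp_all

theorem pvRunCount_ge_two (f : Int → Option Int) (i j : Int) (L : List Int) :
    2 ≤ pvRunCount f (i :: j :: L) ↔ f i = some 1 ∧ f j = some 1 := by
  have h := pvRunCount_nonneg f L
  simp only [pvRunCount]
  by_cases h1 : f i = some 1 <;> by_cases h2 : f j = some 1 <;> simp_all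
  omega

theorem pvRunCount_single_le (f : Int → Option Int) (i : Int) :
    pvRunCount f [i] ≤ 1 := by
  simp only [pvRunCount]; split <;> omega

-- the run-scan count reaches 3 iff the 5-cell window along the line holds
theorem pvLine (f : Int → Option Int) (len c : Int) (h0 : 0 ≤ c) (hc : c < len) :
    (3 ≤ 1 + pvRunCount f (PySem.List.pyRange (c - 1) (-1) (-1))
        + pvRunCount f (PySem.List.pyRange (c + 1) len 1))
    ↔ ((pvOneB f len (c - 2) && pvOneB f len (c - 1)) ||
       (pvOneB f len (c - 1) && pvOneB f len (c + 1)) ||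
       (pvOneB f len (c + 1) && pvOneB f len (c + 2))) = true := by
  have hL0 := pvRunCount_nonneg f (PySem.List.pyRange (c - 1) (-1) (-1))
  have hR0 := pvRunCount_nonneg f (PySem.List.pyRange (c + 1) len 1)
  have b1 : (1 ≤ pvRunCount f (PySem.List.pyRange (c - 1) (-1) (-1))) ↔ pvOneB f len (c - 1) = true := by
    by_cases h1 : 1 ≤ c
    · rw [PySem.List.pyRange_neg_one_cons (by omega), pvRunCount_ge_one]
      simp [pvOneB, show (0:Int) ≤ c - 1 by omega, show c - 1 < len by omega]
      all_goals (intros; first | rfl | tauto | omega | (exfalso; omega))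
    · obtain rfl : c = 0 := by omega
      rw [PySem.List.pyRange_neg_one_eq_nil (by omega)]
      norm_num [pvOneB, pvRunCount]
  have b2 : (2 ≤ pvRunCount f (PySem.List.pyRange (c - 1) (-1) (-1))) ↔ (pvOneB f len (c - 1) && pvOneB f len (c - 2)) = true := by
    by_cases h2 : 2 ≤ c
    · rw [PySem.List.pyRange_neg_one_cons (by omega), PySem.List.pyRange_neg_one_cons (by omega)]
      rw [show c - 1 - 1 = c - 2 by ring, pvRunCount_ge_two]
      simp [pvOneB, show (1:Int) ≤ c by omega, show c - 1 < len by omega,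
            h2, show c - 2 < len by omega]
    · by_cases h1 : 1 ≤ c
      · obtain rfl : c = 1 := by omega
        rw [PySem.List.pyRange_neg_one_cons (by omega), PySem.List.pyRange_neg_one_eq_nil (by omega)]
        have hs := pvRunCount_single_le f ((1:Int) - 1)
        norm_num [pvOneB] at hs ⊢
        omega
      · obtain rfl : c = 0 := by omega
        rw [PySem.List.pyRange_neg_one_eq_nil (by omega)]
        norm_num [pvOneB, pvRunCount]
  have d1 : (1 ≤ pvRunCount f (PySem.List.pyRange (c + 1) len 1)) ↔ pvOneB f len (c + 1) = true := by
    by_cases h1 : c + 1 < len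
    · rw [PySem.List.pyRange_one_cons (by omega), pvRunCount_ge_one]
      simp [pvOneB, show (0:Int) ≤ c + 1 by omega, h1]
      all_goals (intros; first | rfl | tauto | omega | (exfalso; omega))
    · rw [PySem.List.pyRange_one_eq_nil (by omega)]
      simp [pvOneB, pvRunCount, h1]
      all_goals (intros; first | rfl | tauto | omega | (exfalso; omega))
  have d2 : (2 ≤ pvRunCount f (PySem.List.pyRange (c + 1) len 1)) ↔ (pvOneB f len (c + 1) && pvOneB f len (c + 2)) = true := by
    by_cases h2 : c + 2 < len
    · rw [PySem.List.pyRange_one_cons (by omega), PySem.List.pyRange_one_cons (by omega)]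
      rw [show c + 1 + 1 = c + 2 by ring, pvRunCount_ge_two]
      simp [pvOneB, show (0:Int) ≤ c + 1 by omega, show c + 1 < len by omega,
            show (0:Int) ≤ c + 2 by omega, h2]
      all_goals (intros; first | rfl | tauto | omega | (exfalso; omega))
    · by_cases h1 : c + 1 < len
      · rw [PySem.List.pyRange_one_cons (by omega), PySem.List.pyRange_one_eq_nil (by omega)]
        have hs := pvRunCount_single_le f (c + 1)
        simp [pvOneB, show ¬ c + 2 < len by omega]
        all_goals (intros; first | rfl | tauto | omega | (exfalso; omega))
      · rw [PySem.List.pyRange_one_eq_nil (by omega)]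
        simp [pvOneB, pvRunCount, h1]
        all_goals (intros; first | rfl | tauto | omega | (exfalso; omega))
  generalize hGL : pvRunCount f (PySem.List.pyRange (c - 1) (-1) (-1)) = LL at *
  generalize hGR : pvRunCount f (PySem.List.pyRange (c + 1) len 1) = RR at *
  simp only [Bool.or_eq_true, Bool.and_eq_true] at *
  constructor
  · intro h
    rcases (show 2 ≤ LL ∨ 2 ≤ RR ∨ (1 ≤ LL ∧ 1 ≤ RR) from by omega) with h' | h' | h'
    · exact Or.inl (Or.inl (And.comm.mp (b2.mp h')))
    · exact Or.inr (d2.mp h')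
    · exact Or.inl (Or.inr ⟨b1.mp h'.1, d1.mp h'.2⟩)
  · intro h
    rcases h with (h' | h') | h'
    · have := b2.mpr (And.comm.mp h'); omega
    · have h1 := b1.mpr h'.1; have h2 := d1.mpr h'.2; omega
    · have := d2.mpr h'; omega

-- pvOne specialised along a row / a column
theorem pvOneRow (g : List (List Int)) (m : Nat) (i : Nat) (hi : i < g.length) (j : Int) :
    pvOneB (fun j => pvCell g (i : Int) j) (m : Int) j = pvOne g (g.length : Int) (m : Int) (i : Int) j := by
  simp [pvOneB, pvOne, show ((i : Int) < (g.length : Int)) from by exact_mod_cast hi]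

theorem pvOneCol (g : List (List Int)) (m : Nat) (c : Nat) (hc : c < m) (j : Int) :
    pvOneB (fun j => pvCell g j (c : Int)) (g.length : Int) j = pvOne g (g.length : Int) (m : Int) j (c : Int) := by
  simp [pvOneB, pvOne, show ((c : Int) < (m : Int)) from by exact_mod_cast hc, Bool.and_assoc, Bool.and_comm, Bool.and_left_comm]

-- on an in-range cell, pvCell is the getD value
theorem pvCellD (g : List (List Int)) (m : Nat) (hge : ∀ row ∈ g, m ≤ row.length)
    (i c : Nat) (hi : i < g.length) (hc : c < m) :
    pvCell g (i : Int) (c : Int) = some ((g.getD i []).getD c 0) := by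
  have hrow : g.getD i [] = g[i]'hi := List.getD_eq_getElem _ _ hi
  have hlen : c < (g[i]'hi).length := lt_of_lt_of_le hc (hge _ (List.getElem_mem hi))
  have hval : (g.getD i []).getD c 0 = (g[i]'hi)[c]'hlen := by
    rw [hrow, List.getD_eq_getElem _ _ hlen]
  unfold pvCell
  rw [PySem.List.pyGet?_natCast, List.getElem?_eq_getElem hi]
  show PySem.List.pyGet? (g[i]'hi) (c : Int) = _
  rw [PySem.List.pyGet?_natCast, List.getElem?_eq_getElem hlen, hval]

-- A's scan test agrees with B's window test on in-range cells
theorem pvCondEq (g : List (List Int)) (m : Nat) (hge : ∀ row ∈ g, m ≤ row.length)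
    (i c : Nat) (hi : i < g.length) (hc : c < m) :
    ((pvCell g (i : Int) (c : Int) == some 1) && pvIsPart g (g.length : Int) (m : Int) (i : Int) (c : Int))
    = ((pvCell g (i : Int) (c : Int) == some 1) && pvWindow g (g.length : Int) (m : Int) (i : Int) (c : Int)) := by
  have hcell := pvCellD g m hge i c hi hc
  by_cases hv : (g.getD i []).getD c 0 = 1
  · have h1 : (pvCell g (i : Int) (c : Int) == some 1) = true := by rw [hcell, hv]; rfl
    rw [h1, Bool.true_and, Bool.true_and]
    have hIs : pvIsPart g (g.length : Int) (m : Int) (i : Int) (c : Int) = true ↔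
        (3 ≤ 1 + pvRunCount (fun j => pvCell g (i : Int) j) (PySem.List.pyRange ((c : Int) - 1) (-1) (-1))
            + pvRunCount (fun j => pvCell g (i : Int) j) (PySem.List.pyRange ((c : Int) + 1) (m : Int) 1))
        ∨ (3 ≤ 1 + pvRunCount (fun j => pvCell g j (c : Int)) (PySem.List.pyRange ((i : Int) - 1) (-1) (-1))
            + pvRunCount (fun j => pvCell g j (c : Int)) (PySem.List.pyRange ((i : Int) + 1) (g.length : Int) 1)) := by
      simp only [pvIsPart]
      split_ifs with hh hv2
      · simp [hh]
      · simp [hh, hv2]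
      · simp [hh, hv2]
    have hH := pvLine (fun j => pvCell g (i : Int) j) (m : Int) (c : Int)
      (Int.natCast_nonneg c) (by exact_mod_cast hc)
    have hV := pvLine (fun j => pvCell g j (c : Int)) (g.length : Int) (i : Int)
      (Int.natCast_nonneg i) (by exact_mod_cast hi)
    simp only [pvOneRow g m i hi] at hH
    simp only [pvOneCol g m c hc] at hV
    apply Bool.eq_iff_iff.mpr
    rw [hIs, hH, hV]
    simp only [pvWindow, Bool.or_eq_true, Bool.and_eq_true, or_assoc]
  · have h1 : (pvCell g (i : Int) (c : Int) == some 1) = false := by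
      rw [hcell]
      simp only [beq_eq_false_iff_ne, ne_eq, Option.some.injEq]
      exact hv
    rw [h1, Bool.false_and, Bool.false_and]

-- ===== VERDICT (by name: the statement is the Claim_ definition above) =====
theorem solve_spec : Claim_equal_solve := by
  intro g _ hpre
  obtain ⟨hne, hpre⟩ := hpre
  cases g with
  | nil => exact absurd rfl hne
  | cons h t =>
    unfold Spec_solve
    have hge : ∀ row ∈ (h :: t), h.length ≤ row.length := by
      intro row hr; simpa using hpre row hr
    show solve (h :: t) = solve_alt (h :: t)
    simp only [solve, solve_alt, PySem.List.pyGetD_zero_cons, List.map_id',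
      PySem.List.pyRange_zero_natCast, List.foldl_map]
    apply PySem.List.foldl_congr_mem'
    intro r hr acc
    apply PySem.List.foldl_congr_mem'
    intro c hc acc'
    rw [pvCondEq (h :: t) h.length hge r c (by simpa using List.mem_range.mp hr)
      (List.mem_range.mp hc)]
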